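-- pv_equiv track=rewrite | github.com/MrBrantCode/unitest_baseline | mut_generate/mist_train_taco/taco_824/solution.py | check_goto_response
-- ===== SOURCE A (Python) =====
-- def check_goto_response(n, remarks):
--     A_count = 0
--     Un_count = 0
--     ans = 'YES'
--
--     for remark in remarks:
--         if remark == 'A':
--             A_count += 1
--         else:
--             Un_count += 1
--             if A_count < Un_count:
--                 ans = 'NO'
--                 break
--
--     if A_count != Un_count:
--         ans = 'NO'
--
--     return ans
-- ===== SOURCE B (Python) =====
-- def check_goto_response(n, remarks):
--     prefixes = []
--     s = 0
--     for remark in remarks: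
--         s += 1 if remark == 'A' else -1
--         prefixes.append(s)
--     if not prefixes:
--         return 'YES'
--     return 'YES' if min(prefixes) >= 0 and prefixes[-1] == 0 else 'NO'
-- ===== Notes on version B (the rewrite author's own statement) =====
-- stated objective: alternative
-- what changed: Replaces A's fused two-counter online loop with early break by a two-phase approach: first build the full list of prefix balances (+1 for 'A', -1 otherwise), then decide with min(prefixes) >= 0 and prefixes[-1] == 0.
import Mathlib
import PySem

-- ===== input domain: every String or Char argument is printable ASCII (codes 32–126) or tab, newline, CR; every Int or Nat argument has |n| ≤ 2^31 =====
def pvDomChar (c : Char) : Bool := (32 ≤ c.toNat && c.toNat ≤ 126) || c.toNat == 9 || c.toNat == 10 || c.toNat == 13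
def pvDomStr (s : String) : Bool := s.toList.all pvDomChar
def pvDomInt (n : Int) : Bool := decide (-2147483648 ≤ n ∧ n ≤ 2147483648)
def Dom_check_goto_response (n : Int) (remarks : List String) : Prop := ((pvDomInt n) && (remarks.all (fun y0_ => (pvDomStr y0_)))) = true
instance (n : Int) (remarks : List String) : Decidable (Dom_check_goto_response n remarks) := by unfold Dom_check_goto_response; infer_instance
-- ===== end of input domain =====

-- B replaces A's fused two-counter loop (with early break) by a two-phase pass:
-- build the list of running prefix balances, then decide from min(prefixes) and prefixes[-1].

-- ===== PORT A =====
-- the for-loop of A: `a` = A_count, `u` = Un_count; `break` with ans='NO' is returned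
-- directly as "NO" (after a break A_count < Un_count, so the final check keeps 'NO')
def check_goto_response_loop : Int → Int → List String → String
  | a, u, [] => if a ≠ u then "NO" else "YES"
  | a, u, remark :: rest =>
    if remark = "A" then check_goto_response_loop (a + 1) u rest
    else
      let u' := u + 1
      if a < u' then "NO"
      else check_goto_response_loop a u' rest

def check_goto_response (n : Int) (remarks : List String) : String :=
  check_goto_response_loop 0 0 remarks

-- ===== PORT B =====
-- the accumulation loop of Source B: state = (running sum s, prefixes list)
def check_goto_response_alt_prefixes (remarks : List String) : Int × List Int :=
  remarks.foldl
    (fun (st : Int × List Int) remark =>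
      let s := st.1 + (if remark = "A" then 1 else -1)
      (s, st.2 ++ [s]))
    (0, ([] : List Int))

def check_goto_response_alt (n : Int) (remarks : List String) : String :=
  let prefixes := (check_goto_response_alt_prefixes remarks).2
  if prefixes = [] then "YES"
  else
    match PySem.List.min? prefixes (fun x => x), PySem.List.pyGet? prefixes (-1) with
    | some m, some l => if 0 ≤ m ∧ l = 0 then "YES" else "NO"
    | _, _ => "NO"   -- unreachable: prefixes is nonempty here

-- ===== PRECONDITION & SPEC =====
def Spec_check_goto_response (n : Int) (remarks : List String) (out : String) : Prop := out = check_goto_response_alt n remarks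
instance (n : Int) (remarks : List String) (out : String) : Decidable (Spec_check_goto_response n remarks out) := by unfold Spec_check_goto_response; infer_instance

-- ===== CLAIM (what is proved, stated in full; the proofs are below) =====
def Claim_equal_check_goto_response : Prop := ∀ (n : Int) (remarks : List String), Dom_check_goto_response n remarks → Spec_check_goto_response n remarks (check_goto_response n remarks)

-- ===== LEMMAS AND PROOFS =====

-- reference predicate: all prefix balances starting from c stay ≥ 0 and the final balance is 0
def pvOk : Int → List String → Bool
  | c, [] => c == 0
  | c, r :: rs =>
    let c' := c + (if r = "A" then 1 else -1)
    decide (0 ≤ c') && pvOk c' rs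

-- the prefix list Source B builds, starting from running sum s
def pvPref : Int → List String → List Int
  | _, [] => []
  | s, r :: rs =>
    let s' := s + (if r = "A" then 1 else -1)
    s' :: pvPref s' rs

theorem pvPref_ne_nil (s : Int) (r : String) (rs : List String) :
    pvPref s (r :: rs) ≠ [] := by simp [pvPref]

theorem pv_foldl_pref (rs : List String) : ∀ (s : Int) (acc : List Int),
    rs.foldl
      (fun (st : Int × List Int) remark =>
        let x := st.1 + (if remark = "A" then 1 else -1)
        (x, st.2 ++ [x]))
      (s, acc)
      = ((s + ((rs.map (fun r => if r = "A" then (1 : Int) else -1)).sum)),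
         acc ++ pvPref s rs) := by
  induction rs with
  | nil => intro s acc; simp [pvPref]
  | cons r rs ih =>
    intro s acc
    simp only [List.foldl_cons, List.map_cons, List.sum_cons, pvPref]
    rw [ih]
    simp only [Prod.mk.injEq]
    exact ⟨by ring, by simp⟩

theorem pv_foldl_min_swap (t : List Int) : ∀ (a b : Int),
    t.foldl min (min a b) = min a (t.foldl min b) := by
  induction t with
  | nil => intro a b; simp
  | cons c t ih =>
    intro a b
    simp only [List.foldl_cons]
    rw [min_assoc, ih]

-- joint characterisation of min(prefixes) and prefixes[-1] against pvOk
theorem pv_core (rs : List String) : ∀ (s : Int), rs ≠ [] →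
    ∃ m l, PySem.List.min? (pvPref s rs) (fun x => x) = some m ∧
      PySem.List.pyGet? (pvPref s rs) (-1) = some l ∧
      ((0 ≤ m ∧ l = 0) ↔ pvOk s rs = true) := by
  induction rs with
  | nil => intro s h; exact absurd rfl h
  | cons r rs ih =>
    intro s _
    cases rs with
    | nil =>
      refine ⟨s + (if r = "A" then 1 else -1), s + (if r = "A" then 1 else -1), ?_, ?_, ?_⟩
      · simp [pvPref, PySem.List.min?_id_cons]
      · simp [pvPref, PySem.List.pyGet?_neg_one]
      · simp [pvOk]
    | cons r2 rs' =>
      obtain ⟨m, l, hm, hl, hiff⟩ := ih (s + (if r = "A" then 1 else -1)) (by simp)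
      set s' := s + (if r = "A" then 1 else -1) with hs'
      obtain ⟨y, t, hyt⟩ : ∃ y t, pvPref s' (r2 :: rs') = y :: t :=
        ⟨_, _, rfl⟩
      refine ⟨min s' m, l, ?_, ?_, ?_⟩
      · have hm' : (t.foldl min y) = m := by
          rw [hyt, PySem.List.min?_id_cons] at hm
          exact Option.some.inj hm
        show PySem.List.min? (s' :: pvPref s' (r2 :: rs')) (fun x => x) = some (min s' m)
        rw [hyt, PySem.List.min?_id_cons]
        simp only [List.foldl_cons]
        rw [pv_foldl_min_swap, hm']
      · show PySem.List.pyGet? (s' :: pvPref s' (r2 :: rs')) (-1) = some l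
        rw [PySem.List.pyGet?_neg_one] at hl ⊢
        rw [hyt] at hl ⊢
        simpa using hl
      · show (0 ≤ min s' m ∧ l = 0) ↔ pvOk s (r :: r2 :: rs') = true
        have : pvOk s (r :: r2 :: rs') = (decide (0 ≤ s') && pvOk s' (r2 :: rs')) := rfl
        rw [this, Bool.and_eq_true, decide_eq_true_iff, ← hiff, le_min_iff]
        tauto

-- A's loop matches pvOk on the current balance a - u (invariant u ≤ a)
theorem pv_loopA (rs : List String) : ∀ (a u : Int), u ≤ a →
    check_goto_response_loop a u rs = if pvOk (a - u) rs then "YES" else "NO" := by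
  induction rs with
  | nil =>
    intro a u _
    simp only [check_goto_response_loop, pvOk]
    by_cases h : a = u
    · simp [h]
    · have : ¬ (a - u = 0) := by omega
      simp [h, this]
  | cons r rs ih =>
    intro a u hu
    by_cases hr : r = "A"
    · rw [show check_goto_response_loop a u (r :: rs)
            = check_goto_response_loop (a + 1) u rs by simp [check_goto_response_loop, hr]]
      rw [ih (a + 1) u (by omega)]
      have hok : pvOk (a - u) (r :: rs) = pvOk (a + 1 - u) rs := by
        simp only [pvOk, hr]
        have h2 : a - u + 1 = a + 1 - u := by ring
        simp [h2]
        intro _; omega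
      rw [hok]
    · by_cases hlt : a < u + 1
      · have ha : a = u := by omega
        rw [show check_goto_response_loop a u (r :: rs) = "NO" by
              simp [check_goto_response_loop, hr, hlt]]
        have : pvOk (a - u) (r :: rs) = false := by
          simp only [pvOk, hr, ha]
          simp
        rw [this]; simp
      · rw [show check_goto_response_loop a u (r :: rs)
              = check_goto_response_loop a (u + 1) rs by
              simp [check_goto_response_loop, hr, hlt]]
        rw [ih a (u + 1) (by omega)]
        have hok : pvOk (a - u) (r :: rs) = pvOk (a - (u + 1)) rs := by
          simp only [pvOk, if_neg hr]
          have h2 : a - u + -1 = a - (u + 1) := by ring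
          simp [h2]
          intro _; omega
        rw [hok]
-- ===== VERDICT (by name: the statement is the Claim_ definition above) =====
theorem check_goto_response_spec : Claim_equal_check_goto_response := by
  intro n remarks _
  show check_goto_response n remarks = check_goto_response_alt n remarks
  rw [check_goto_response, pv_loopA remarks 0 0 le_rfl]
  rw [check_goto_response_alt]
  have hp : (check_goto_response_alt_prefixes remarks).2 = pvPref 0 remarks := by
    rw [check_goto_response_alt_prefixes, pv_foldl_pref]
    simp
  cases remarks with
  | nil => simp [hp, pvPref, pvOk]
  | cons r rs =>
    obtain ⟨m, l, hm, hl, hiff⟩ := pv_core (r :: rs) 0 (by simp)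
    simp only [hp, if_neg (pvPref_ne_nil 0 r rs), hm, hl]
    show (if pvOk (0 - 0 : Int) (r :: rs) = true then "YES" else "NO")
        = if 0 ≤ m ∧ l = 0 then "YES" else "NO"
    rw [show (0 - 0 : Int) = 0 by ring]
    by_cases hok : pvOk 0 (r :: rs) = true
    · rw [if_pos hok, if_pos (hiff.mpr hok)]
    · rw [if_neg hok, if_neg (fun h => hok (hiff.mp h))]
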